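-- pv_equiv track=rewrite | github.com/AbsoluteStratos/CasinoKnight | etc/par_sheet.py | build_combo_table
-- ===== SOURCE A (Python) =====
-- def build_combo_table(reels: list[list[str]]):
--
--
--     combo_table = reels[0]
--     for reel in reels[1:]:
--         stack = []
--         for combo0 in combo_table:
--             for symbol in reel:
--                 stack.append(combo0 + symbol)
--
--         combo_table = stack
--     return combo_table
-- ===== SOURCE B (Python) =====
-- def build_combo_table(reels: list[list[str]]):
--     return _product(reels)
--
-- def _product(reels):
--     if not reels:
--         return ['']
--     return [s + t for s in reels[0] for t in _product(reels[1:])]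
-- ===== Notes on version B (the rewrite author's own statement) =====
-- stated objective: idiomatic
-- what changed: Replaced A's left fold that rebuilds an intermediate prefix-string list per reel (triple nested loop with an explicit stack accumulator) by a right recursion on the list of reels that builds the Cartesian product of the suffix and prepends each symbol of the first reel; Pre_ excludes the empty reel list, on which A raises IndexError (reels[0]) while B naturally returns [''].
import Mathlib
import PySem

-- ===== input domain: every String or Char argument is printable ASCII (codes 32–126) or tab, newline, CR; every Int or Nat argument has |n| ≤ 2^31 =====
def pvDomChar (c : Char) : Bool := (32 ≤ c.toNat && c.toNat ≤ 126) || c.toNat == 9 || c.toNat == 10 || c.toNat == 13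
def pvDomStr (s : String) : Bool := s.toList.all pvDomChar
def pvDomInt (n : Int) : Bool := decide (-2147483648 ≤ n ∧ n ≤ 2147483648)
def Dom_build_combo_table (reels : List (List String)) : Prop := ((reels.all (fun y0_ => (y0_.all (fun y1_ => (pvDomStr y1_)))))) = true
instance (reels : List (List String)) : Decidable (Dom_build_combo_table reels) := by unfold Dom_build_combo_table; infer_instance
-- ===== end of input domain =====

-- B replaces A's left fold with a stack accumulator by a right recursion building the
-- suffix Cartesian product (objective: idiomatic); A raises on [], excluded by Pre_.

-- ===== PORT A =====
-- A: combo_table = reels[0]; for reel in reels[1:]: stack = []; nested append loop; return combo_table.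
-- reels[0] raises IndexError on []; that input is excluded by Pre_ (the [] branch here is unreachable under Pre_).
def build_combo_table (reels : List (List String)) : List String :=
  match reels with
  | [] => []
  | r0 :: rest =>
    rest.foldl (fun combo_table reel =>
      combo_table.foldl (fun stack combo0 =>
        reel.foldl (fun stack symbol => stack ++ [combo0 ++ symbol]) stack) []) r0

-- ===== PORT B =====
-- helper _product: recursion on the reel list
def pvProduct : List (List String) → List String
  | [] => [""]
  | r :: rest => r.flatMap (fun s => (pvProduct rest).map (fun t => s ++ t))

def build_combo_table_alt (reels : List (List String)) : List String :=
  pvProduct reels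

-- ===== PRECONDITION & SPEC =====
-- Pre_ excludes the empty reel list, on which the Python A raises IndexError at reels[0].
def Pre_build_combo_table (reels : List (List String)) : Prop := reels ≠ []
instance (reels : List (List String)) : Decidable (Pre_build_combo_table reels) := by unfold Pre_build_combo_table; infer_instance
def pvWitness_build_combo_table : List (List String) := [["a", "b"], ["x"]]

def Spec_build_combo_table (reels : List (List String)) (out : List String) : Prop := out = build_combo_table_alt reels
instance (reels : List (List String)) (out : List String) : Decidable (Spec_build_combo_table reels out) := by unfold Spec_build_combo_table; infer_instance

-- ===== CLAIM (what is proved, stated in full; the proofs are below) =====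
def Claim_equal_build_combo_table : Prop := ∀ (reels : List (List String)), Dom_build_combo_table reels → Pre_build_combo_table reels → Spec_build_combo_table reels (build_combo_table reels)

-- ===== LEMMAS AND PROOFS =====

-- inner loop: for symbol in reel: stack.append(combo0 + symbol)
theorem pvInner (reel : List String) (c : String) (acc : List String) :
    reel.foldl (fun stack symbol => stack ++ [c ++ symbol]) acc = acc ++ reel.map (fun s => c ++ s) := by
  induction reel generalizing acc with
  | nil => simp
  | cons x xs ih => simp [List.foldl, ih]

-- middle loop: flushes each combo0's products into the growing stack
theorem pvMiddle (ct reel : List String) (acc : List String) :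
    ct.foldl (fun stack combo0 => reel.foldl (fun stack symbol => stack ++ [combo0 ++ symbol]) stack) acc
      = acc ++ ct.flatMap (fun c => reel.map (fun s => c ++ s)) := by
  induction ct generalizing acc with
  | nil => simp
  | cons c cs ih => rw [List.foldl_cons, pvInner, ih, List.flatMap_cons, List.append_assoc]

-- outer loop: A's fold starting from ct equals distributing ct over B's suffix product
theorem pvOuter (rest : List (List String)) (ct : List String) :
    rest.foldl (fun combo_table reel =>
        combo_table.foldl (fun stack combo0 =>
          reel.foldl (fun stack symbol => stack ++ [combo0 ++ symbol]) stack) []) ct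
      = ct.flatMap (fun c => (pvProduct rest).map (fun t => c ++ t)) := by
  induction rest generalizing ct with
  | nil => simp [pvProduct]
  | cons r rs ih =>
    rw [List.foldl_cons, pvMiddle, List.nil_append, ih, pvProduct, List.flatMap_assoc]
    congr 1; funext c
    rw [List.flatMap_map, List.map_flatMap]
    congr 1; funext s
    simp [Function.comp, String.append_assoc]

-- ===== VERDICT (by name: the statement is the Claim_ definition above) =====
theorem build_combo_table_spec : Claim_equal_build_combo_table := by
  intro reels _ hpre
  unfold Spec_build_combo_table
  match reels with
  | [] => exact absurd rfl hpre
  | r0 :: rest =>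
    simp only [build_combo_table, build_combo_table_alt, pvProduct, pvOuter]
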